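-- pv_equiv track=rewrite | github.com/DARC-e-V/50ohm | renderer/fifty_ohm_latex_slide_renderer.py | render_morse_helper
-- ===== SOURCE A (Python) =====
-- def render_morse_helper(morse_code):
--     parts = []
--     for i, char in enumerate(morse_code):
--         if char == [3]:
--             parts.append(r"\MorseWordSep{}")
--         else:
--             if i > 0 and morse_code[i - 1] != [3]:
--                 parts.append(r"\MorseCharSep{}")
--             symbols = []
--             for symbol in char:
--                 if symbol == 1:
--                     symbols.append(r"\MorseDit{}")
--                 elif symbol == 2:
--                     symbols.append(r"\MorseDah{}")
--             parts.append("".join(symbols))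
--     return "".join(parts)
-- ===== SOURCE B (Python) =====
-- def render_morse_helper(morse_code):
--     def render_char(char):
--         return "".join(
--             r"\MorseDit{}" if s == 1 else r"\MorseDah{}" if s == 2 else ""
--             for s in char
--         )
--     groups = []
--     cur = []
--     for char in morse_code:
--         if char == [3]:
--             groups.append(cur)
--             cur = []
--         else:
--             cur.append(char)
--     groups.append(cur)
--     return r"\MorseWordSep{}".join(
--         r"\MorseCharSep{}".join(render_char(c) for c in g) for g in groups
--     )
-- ===== Notes on version B (the rewrite author's own statement) =====
-- stated objective: alternative
-- what changed: Replaces A's single pass with an i>0 look-back at morse_code[i-1] by a partition of the input into groups at the [3] sentinel, rendering each group's chars and joining with \MorseCharSep{} inside groups and \MorseWordSep{} between groups.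
import Mathlib
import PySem

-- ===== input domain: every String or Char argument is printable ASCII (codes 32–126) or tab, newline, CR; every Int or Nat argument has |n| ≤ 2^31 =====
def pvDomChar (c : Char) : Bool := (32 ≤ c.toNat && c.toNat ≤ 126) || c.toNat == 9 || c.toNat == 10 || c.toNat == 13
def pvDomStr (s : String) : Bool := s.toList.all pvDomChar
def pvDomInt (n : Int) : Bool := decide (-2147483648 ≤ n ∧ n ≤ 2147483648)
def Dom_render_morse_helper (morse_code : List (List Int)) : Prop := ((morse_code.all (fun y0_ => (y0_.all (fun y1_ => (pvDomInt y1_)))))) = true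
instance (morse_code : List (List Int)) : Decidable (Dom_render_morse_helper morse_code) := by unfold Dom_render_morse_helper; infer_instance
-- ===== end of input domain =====

-- B re-renders the same LaTeX by splitting on the [3] sentinel into groups and joining with the
-- separators (a different decomposition: partition + join instead of A's index look-back pass).

-- ===== PORT A =====
def render_morse_helper (morse_code : List (List Int)) : String :=
  let parts := (PySem.List.enumerate morse_code).foldl
    (fun parts (p : Int × List Int) =>
      if p.2 = [3] then parts ++ ["\\MorseWordSep{}"]
      else
        -- 'i > 0 and morse_code[i-1] != [3]'; the index i-1 is always in range when 0 < i
        let parts := if 0 < p.1 ∧ (PySem.List.pyGet? morse_code (p.1 - 1)).getD [] ≠ [3]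
                     then parts ++ ["\\MorseCharSep{}"] else parts
        let symbols := p.2.foldl
          (fun symbols s =>
            if s = 1 then symbols ++ ["\\MorseDit{}"]
            else if s = 2 then symbols ++ ["\\MorseDah{}"]
            else symbols) ([] : List String)
        parts ++ [PySem.Str.join "" symbols]) ([] : List String)
  PySem.Str.join "" parts

-- ===== PORT B =====
def pvRenderChar (char : List Int) : String :=
  PySem.Str.join "" (char.map (fun s =>
    if s = 1 then "\\MorseDit{}" else if s = 2 then "\\MorseDah{}" else ""))

def render_morse_helper_alt (morse_code : List (List Int)) : String :=
  let p := morse_code.foldl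
    (fun (p : List (List (List Int)) × List (List Int)) char =>
      if char = [3] then (p.1 ++ [p.2], []) else (p.1, p.2 ++ [char]))
    ([], [])
  let groups := p.1 ++ [p.2]
  PySem.Str.join "\\MorseWordSep{}"
    (groups.map (fun g => PySem.Str.join "\\MorseCharSep{}" (g.map pvRenderChar)))

-- ===== PRECONDITION & SPEC =====
def Spec_render_morse_helper (morse_code : List (List Int)) (out : String) : Prop := out = render_morse_helper_alt morse_code
instance (morse_code : List (List Int)) (out : String) : Decidable (Spec_render_morse_helper morse_code out) := by unfold Spec_render_morse_helper; infer_instance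

-- ===== CLAIM (what is proved, stated in full; the proofs are below) =====
def Claim_equal_render_morse_helper : Prop := ∀ (morse_code : List (List Int)), Dom_render_morse_helper morse_code → Spec_render_morse_helper morse_code (render_morse_helper morse_code)

-- ===== LEMMAS AND PROOFS =====

def pvSymf (s : Int) : List String :=
  if s = 1 then ["\\MorseDit{}"] else if s = 2 then ["\\MorseDah{}"] else []

def pvRcL (char : List Int) : List Char := (pvRenderChar char).toList

def pvWsL : List Char := "\\MorseWordSep{}".toList
def pvCsL : List Char := "\\MorseCharSep{}".toList

lemma pv_join_empty (l : List String) :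
    (PySem.Str.join "" l).toList = (l.map String.toList).flatten := by
  rw [PySem.Str.toList_join]
  induction l with
  | nil => simp [PySem.Chars.join_nil]
  | cons a t ih =>
    cases t with
    | nil => simp [PySem.Chars.join_singleton]
    | cons b r => simpa [PySem.Chars.join_cons_cons] using ih

lemma pv_symfold (char : List Int) :
    ∀ (acc : List String),
    char.foldl (fun symbols s =>
      if s = 1 then symbols ++ ["\\MorseDit{}"]
      else if s = 2 then symbols ++ ["\\MorseDah{}"]
      else symbols) acc = acc ++ char.flatMap pvSymf := by
  induction char with
  | nil => intro acc; simp
  | cons s t ih =>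
    intro acc
    simp only [List.foldl_cons, List.flatMap_cons]
    by_cases h1 : s = 1
    · simp [h1, pvSymf, ih]
    · by_cases h2 : s = 2 <;> simp [h1, h2, pvSymf, ih]

-- A's symbol loop and B's per-char map produce the same joined characters
lemma pv_char_eq (char : List Int) :
    (PySem.Str.join "" (char.foldl
      (fun symbols s =>
        if s = 1 then symbols ++ ["\\MorseDit{}"]
        else if s = 2 then symbols ++ ["\\MorseDah{}"]
        else symbols) ([] : List String))).toList = pvRcL char := by
  rw [pv_symfold char [], List.nil_append, pvRcL, pvRenderChar,
    pv_join_empty, pv_join_empty]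
  induction char with
  | nil => simp
  | cons s t ih =>
    simp only [List.flatMap_cons, List.map_cons, List.map_append, List.flatten_append,
      List.flatten_cons, ih]
    congr 1
    simp only [pvSymf]
    split_ifs <;> simp

-- A as a simple recursion on the list ---------------------------------------

def pvARec (sep : Bool) : List (List Int) → List Char
  | [] => []
  | c :: rest =>
      if c = [3] then pvWsL ++ pvARec false rest
      else (if sep then pvCsL else []) ++ pvRcL c ++ pvARec true rest

def pvGA (mc : List (List Int)) (p : Int × List Int) : List String :=
  if p.2 = [3] then ["\\MorseWordSep{}"]
  else (if 0 < p.1 ∧ (PySem.List.pyGet? mc (p.1 - 1)).getD [] ≠ [3]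
        then ["\\MorseCharSep{}"] else []) ++
       [PySem.Str.join "" (p.2.foldl
          (fun symbols s =>
            if s = 1 then symbols ++ ["\\MorseDit{}"]
            else if s = 2 then symbols ++ ["\\MorseDah{}"]
            else symbols) ([] : List String))]

def pvSepOf (mc : List (List Int)) (k : Nat) : Bool :=
  decide (0 < (k : Int) ∧ (PySem.List.pyGet? mc ((k : Int) - 1)).getD [] ≠ [3])

lemma pv_partsfold (mc : List (List Int)) (L : List (Int × List Int)) :
    ∀ (acc : List String),
    L.foldl (fun parts (p : Int × List Int) =>
      if p.2 = [3] then parts ++ ["\\MorseWordSep{}"]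
      else
        let parts := if 0 < p.1 ∧ (PySem.List.pyGet? mc (p.1 - 1)).getD [] ≠ [3]
                     then parts ++ ["\\MorseCharSep{}"] else parts
        let symbols := p.2.foldl
          (fun symbols s =>
            if s = 1 then symbols ++ ["\\MorseDit{}"]
            else if s = 2 then symbols ++ ["\\MorseDah{}"]
            else symbols) ([] : List String)
        parts ++ [PySem.Str.join "" symbols]) acc = acc ++ L.flatMap (pvGA mc) := by
  induction L with
  | nil => intro acc; simp
  | cons p t ih =>
    intro acc
    simp only [List.foldl_cons, List.flatMap_cons]
    by_cases h3 : p.2 = [3]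
    · simp [pvGA, h3, ih]
    · by_cases hs : 0 < p.1 ∧ (PySem.List.pyGet? mc (p.1 - 1)).getD [] ≠ [3] <;>
        simp [pvGA, h3, hs, ih]

lemma pv_enum_aRec (mc : List (List Int)) :
    ∀ (l : List (List Int)) (k : Nat), l = mc.drop k →
    (((PySem.List.enumerate l (k : Int)).flatMap (pvGA mc)).map String.toList).flatten
      = pvARec (pvSepOf mc k) l := by
  intro l
  induction l with
  | nil => intro k _; simp [PySem.List.enumerate, pvARec]
  | cons c rest ih =>
    intro k hk
    have hget : mc[k]? = some c := by
      have := congrArg List.head? hk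
      simpa [List.head?_drop] using this.symm
    have hrest : rest = mc.drop (k + 1) := by
      have := congrArg List.tail hk
      simpa [← List.tail_drop] using this
    have hsep1 : pvSepOf mc (k + 1) = decide (c ≠ [3]) := by
      simp only [pvSepOf]
      have he : ((k + 1 : Nat) : Int) - 1 = ((k : Nat) : Int) := by push_cast; ring
      simp [PySem.List.pyGet?_natCast, hget]
    rw [PySem.List.enumerate_cons, List.flatMap_cons, List.map_append,
      List.flatten_append]
    have hpush : ((k : Int) + 1) = ((k + 1 : Nat) : Int) := by push_cast; ring
    rw [hpush, ih (k + 1) hrest, hsep1]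
    by_cases h3 : c = [3]
    · subst h3
      simp [pvGA, pvARec, pvWsL]
    · have hchar := pv_char_eq c
      simp only [pvGA, pvARec, if_neg h3]
      by_cases hs : 0 < (k : Int) ∧ (PySem.List.pyGet? mc ((k : Int) - 1)).getD [] ≠ [3] <;>
        · simp only [hs, pvSepOf, decide_eq_true_eq]
          split_ifs <;> simp_all [pvCsL]

lemma pv_A_eq_aRec (mc : List (List Int)) :
    (render_morse_helper mc).toList = pvARec false mc := by
  rw [render_morse_helper]
  simp only [pv_partsfold mc, List.nil_append, pv_join_empty]
  have := pv_enum_aRec mc mc 0 (by simp)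
  simpa [pvSepOf] using this

-- B as split-into-groups ----------------------------------------------------

def pvSplit : List (List Int) → List (List (List Int))
  | [] => [[]]
  | c :: rest =>
      if c = [3] then [] :: pvSplit rest
      else
        match pvSplit rest with
        | g :: t => (c :: g) :: t
        | [] => [[c]]

lemma pvSplit_ne_nil (l : List (List Int)) : pvSplit l ≠ [] := by
  cases l with
  | nil => simp [pvSplit]
  | cons c rest =>
    simp only [pvSplit]
    split_ifs with h
    · simp
    · cases h' : pvSplit rest <;> simp

lemma pv_fold_split :
    ∀ (l : List (List Int)) (gs : List (List (List Int))) (cur : List (List Int)),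
    (l.foldl (fun (p : List (List (List Int)) × List (List Int)) char =>
        if char = [3] then (p.1 ++ [p.2], []) else (p.1, p.2 ++ [char])) (gs, cur)).1 ++
    [(l.foldl (fun (p : List (List (List Int)) × List (List Int)) char =>
        if char = [3] then (p.1 ++ [p.2], []) else (p.1, p.2 ++ [char])) (gs, cur)).2] =
    gs ++ (match pvSplit l with
           | g :: t => (cur ++ g) :: t
           | [] => [cur]) := by
  intro l
  induction l with
  | nil => intro gs cur; simp [pvSplit]
  | cons c rest ih =>
    intro gs cur
    by_cases h3 : c = [3]
    · simp only [List.foldl_cons, if_pos h3, pvSplit, ih (gs ++ [cur]) []]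
      cases h : pvSplit rest with
      | nil => exact absurd h (pvSplit_ne_nil rest)
      | cons g t => simp
    · simp only [List.foldl_cons, if_neg h3, pvSplit, ih gs (cur ++ [c])]
      cases h : pvSplit rest with
      | nil => exact absurd h (pvSplit_ne_nil rest)
      | cons g t => simp

def pvGrpL (g : List (List Int)) : List Char :=
  (PySem.Str.join "\\MorseCharSep{}" (g.map pvRenderChar)).toList

def pvJoinB (l : List (List Int)) : List Char :=
  PySem.Chars.join pvWsL ((pvSplit l).map pvGrpL)

lemma pv_B_eq_joinB (mc : List (List Int)) :
    (render_morse_helper_alt mc).toList = pvJoinB mc := by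
  rw [render_morse_helper_alt]
  simp only [pv_fold_split mc [] [], List.nil_append]
  rw [PySem.Str.toList_join, pvJoinB]

  have hmap : ∀ (gs : List (List (List Int))),
      (gs.map (fun g => PySem.Str.join "\\MorseCharSep{}" (g.map pvRenderChar))).map
        String.toList = gs.map pvGrpL := by
    intro gs; rw [List.map_map]; rfl
  cases h : pvSplit mc with
  | nil => exact absurd h (pvSplit_ne_nil mc)
  | cons g t =>
    simp [hmap, pvWsL, pvGrpL, PySem.Str.toList_join, List.map_map]

-- joinB equals A's recursion ------------------------------------------------

def pvHeadNZ : List (List Int) → Bool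
  | [] => false
  | c :: _ => decide (c ≠ [3])

lemma pv_grp_cons (c : List Int) (g : List (List Int)) :
    pvGrpL (c :: g) = pvRcL c ++ (if g = [] then [] else pvCsL) ++ pvGrpL g := by
  cases g with
  | nil =>
    simp [pvGrpL, PySem.Str.toList_join, PySem.Chars.join_singleton,
      PySem.Chars.join_nil, pvRcL]
  | cons d t =>
    simp only [pvGrpL, PySem.Str.toList_join, List.map_cons, PySem.Chars.join_cons_cons,
      if_neg (List.cons_ne_nil d t)]
    simp [pvRcL, pvCsL]

lemma pv_headNZ_split (l : List (List Int)) (g : List (List Int)) (t : List (List (List Int)))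
    (h : pvSplit l = g :: t) : pvHeadNZ l = decide (g ≠ []) := by
  cases l with
  | nil =>
    simp [pvSplit] at h
    simp [pvHeadNZ, ← h.1]
  | cons c rest =>
    simp only [pvSplit] at h
    split_ifs at h with h3
    · injection h with h1 h2
      simp [pvHeadNZ, h3, ← h1]
    · cases h' : pvSplit rest with
      | nil => exact absurd h' (pvSplit_ne_nil rest)
      | cons g' t' =>
        rw [h'] at h
        simp only [List.cons.injEq] at h
        simp [pvHeadNZ, h3, ← h.1]

lemma pv_joinB_split (l : List (List Int)) (g : List (List Int))
    (t : List (List (List Int))) (h : pvSplit l = g :: t) :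
    pvJoinB l = pvGrpL g ++
      (if t = [] then [] else pvWsL ++ PySem.Chars.join pvWsL (t.map pvGrpL)) := by
  rw [pvJoinB, h, List.map_cons]
  cases t with
  | nil => simp [PySem.Chars.join_singleton]
  | cons u v =>
    simp only [List.map_cons, PySem.Chars.join_cons_cons, if_neg (List.cons_ne_nil u v)]
    simp [List.append_assoc]

lemma pv_F (l : List (List Int)) :
    ∀ (sep : Bool),
    (if sep && pvHeadNZ l then pvCsL else []) ++ pvJoinB l = pvARec sep l := by
  induction l with
  | nil =>
    intro sep
    simp [pvJoinB, pvSplit, pvHeadNZ, pvARec, PySem.Chars.join_singleton, pvGrpL,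
      PySem.Str.toList_join, PySem.Chars.join_nil]
  | cons c rest ih =>
    intro sep
    obtain ⟨g, t, h⟩ : ∃ g t, pvSplit rest = g :: t := by
      cases h' : pvSplit rest with
      | nil => exact absurd h' (pvSplit_ne_nil rest)
      | cons g t => exact ⟨g, t, rfl⟩
    by_cases h3 : c = [3]
    · subst h3
      have hsplitc : pvSplit ([3] :: rest) = [] :: g :: t := by
        simp [pvSplit, h]
      have hws : pvJoinB ([3] :: rest) = pvWsL ++ pvJoinB rest := by
        rw [pvJoinB, hsplitc, List.map_cons, List.map_cons, PySem.Chars.join_cons_cons,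
          pvJoinB, h, List.map_cons]
        simp [pvGrpL, PySem.Str.toList_join, PySem.Chars.join_nil]
      have hIH := ih false
      simp only [Bool.false_and, if_neg (by simp : ¬ (false = true)), List.nil_append] at hIH
      rw [hws]
      simp only [pvARec, pvHeadNZ]
      simp [hIH]
    · have hsplitc : pvSplit (c :: rest) = (c :: g) :: t := by
        simp only [pvSplit, if_neg h3, h]
      have h1 := pv_joinB_split _ _ _ hsplitc
      have h2 := pv_joinB_split _ _ _ h
      have hIH := ih true
      rw [pv_headNZ_split rest g t h] at hIH
      simp only [Bool.true_and] at hIH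
      simp only [pvARec, if_neg h3, ← hIH]
      rw [h1, pv_grp_cons, h2]
      simp only [pvHeadNZ]
      by_cases hg : g = [] <;> by_cases hsep : sep <;>
        simp [hg, hsep, h3, List.append_assoc]

-- ===== VERDICT (by name: the statement is the Claim_ definition above) =====
theorem render_morse_helper_spec : Claim_equal_render_morse_helper := by
  intro mc _
  unfold Spec_render_morse_helper
  apply String.toList_inj.mp
  rw [pv_A_eq_aRec, pv_B_eq_joinB, ← pv_F mc false]
  simp
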